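-- pv_equiv track=rewrite | github.com/edwinyyyu/MemMachine | evaluation/attribute_memory/research/round23_prose_facts/architectures/aen6_prose_v3.py | _render_window_block
-- ===== SOURCE A (Python) =====
-- def _render_window_block(window_turns, target_turn_lo):
--     lines = []
--     in_target = False
--     for tidx, text in window_turns:
--         if not in_target and tidx >= target_turn_lo:
--             lines.append("--- TARGET TURNS ---")
--             in_target = True
--         prefix = "  TARGET" if in_target else "  CONTEXT"
--         lines.append(f"{prefix} TURN {tidx}: {text}")
--     if not in_target:
--         lines.insert(0, "--- TARGET TURNS ---")
--     return "\n".join(lines)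
-- ===== SOURCE B (Python) =====
-- def _line(kind, turn):
--     tidx, text = turn
--     return f"  {kind} TURN {tidx}: {text}"
--
--
-- def _split_at_target(turns, target_turn_lo):
--     """Split at the first turn with tidx >= target_turn_lo; target part is None if none crosses."""
--     for i, (tidx, _) in enumerate(turns):
--         if tidx >= target_turn_lo:
--             return turns[:i], turns[i:]
--     return turns, None
--
--
-- def _render_window_block(window_turns, target_turn_lo):
--     ctx, tgt = _split_at_target(list(window_turns), target_turn_lo)
--     if tgt is None:
--         parts = ["--- TARGET TURNS ---"] + [_line("CONTEXT", t) for t in ctx]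
--     else:
--         parts = [_line("CONTEXT", t) for t in ctx] + ["--- TARGET TURNS ---"] + [_line("TARGET", t) for t in tgt]
--     return "\n".join(parts)
-- ===== Notes on version B (the rewrite author's own statement) =====
-- stated objective: simpler
-- what changed: Replaces the running in_target flag and the post-hoc lines.insert(0, ...) with a boundary-finding split at the first turn crossing target_turn_lo, then two shaped comprehensions joined around the header.
import Mathlib
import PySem

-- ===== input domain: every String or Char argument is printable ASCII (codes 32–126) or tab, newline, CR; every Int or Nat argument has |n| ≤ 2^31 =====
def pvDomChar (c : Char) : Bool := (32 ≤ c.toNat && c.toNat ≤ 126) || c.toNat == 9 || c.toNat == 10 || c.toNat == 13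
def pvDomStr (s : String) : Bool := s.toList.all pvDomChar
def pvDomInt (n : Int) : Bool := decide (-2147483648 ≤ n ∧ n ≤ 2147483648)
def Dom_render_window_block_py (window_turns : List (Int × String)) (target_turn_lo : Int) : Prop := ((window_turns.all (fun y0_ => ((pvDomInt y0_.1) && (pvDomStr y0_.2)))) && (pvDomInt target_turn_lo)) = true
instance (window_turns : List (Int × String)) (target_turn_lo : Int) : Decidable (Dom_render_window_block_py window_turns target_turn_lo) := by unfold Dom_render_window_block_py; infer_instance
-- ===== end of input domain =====

-- B replaces A's running in_target flag (and the post-hoc insert of the header) by splitting the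
-- turn list at the first turn crossing target_turn_lo and rendering the two slices around the header
-- (objective: simpler decomposition; same O(n) cost).

-- ===== PORT A =====
-- the body of A's for-loop over (lines, in_target)
def pvStepA (target_turn_lo : Int) (st : List String × Bool) (p : Int × String) : List String × Bool :=
  let st1 := if !st.2 && decide (p.1 ≥ target_turn_lo)
             then (st.1 ++ ["--- TARGET TURNS ---"], true) else st
  let pre := if st1.2 then "  TARGET" else "  CONTEXT"
  (st1.1 ++ [pre ++ " TURN " ++ PySem.Int.toStr p.1 ++ ": " ++ p.2], st1.2)

def render_window_block_py (window_turns : List (Int × String)) (target_turn_lo : Int) : String :=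
  let st := window_turns.foldl (pvStepA target_turn_lo) ([], false)
  let lines := if !st.2 then "--- TARGET TURNS ---" :: st.1 else st.1
  PySem.Str.join "\n" lines

-- ===== PORT B =====
def pvLine (kind : String) (t : Int × String) : String :=
  "  " ++ kind ++ " TURN " ++ PySem.Int.toStr t.1 ++ ": " ++ t.2

-- scan for the first turn with tidx >= target_turn_lo and split there (none = no turn crosses)
def pvSplitAtTarget (turns : List (Int × String)) (target_turn_lo : Int) :
    List (Int × String) × Option (List (Int × String)) :=
  match turns with
  | [] => ([], none)
  | p :: rest =>
    if p.1 ≥ target_turn_lo then ([], some (p :: rest))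
    else
      let r := pvSplitAtTarget rest target_turn_lo
      (p :: r.1, r.2)

def render_window_block_py_alt (window_turns : List (Int × String)) (target_turn_lo : Int) : String :=
  let s := pvSplitAtTarget window_turns target_turn_lo
  let parts := match s.2 with
    | none => "--- TARGET TURNS ---" :: s.1.map (pvLine "CONTEXT")
    | some ts => s.1.map (pvLine "CONTEXT") ++ ["--- TARGET TURNS ---"] ++ ts.map (pvLine "TARGET")
  PySem.Str.join "\n" parts

-- ===== PRECONDITION & SPEC =====
def Spec_render_window_block_py (window_turns : List (Int × String)) (target_turn_lo : Int) (out : String) : Prop := out = render_window_block_py_alt window_turns target_turn_lo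
instance (window_turns : List (Int × String)) (target_turn_lo : Int) (out : String) : Decidable (Spec_render_window_block_py window_turns target_turn_lo out) := by unfold Spec_render_window_block_py; infer_instance

-- ===== CLAIM (what is proved, stated in full; the proofs are below) =====
def Claim_equal_render_window_block_py : Prop := ∀ (window_turns : List (Int × String)) (target_turn_lo : Int), Dom_render_window_block_py window_turns target_turn_lo → Spec_render_window_block_py window_turns target_turn_lo (render_window_block_py window_turns target_turn_lo)

-- ===== LEMMAS AND PROOFS =====
lemma pvStepA_true (lo : Int) (lines : List String) (p : Int × String) :
    pvStepA lo (lines, true) p = (lines ++ [pvLine "TARGET" p], true) := by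
  simp [pvStepA, pvLine]

lemma pvStepA_false_ge (lo : Int) (lines : List String) (p : Int × String) (h : p.1 ≥ lo) :
    pvStepA lo (lines, false) p = (lines ++ ["--- TARGET TURNS ---", pvLine "TARGET" p], true) := by
  simp [pvStepA, h, pvLine]

lemma pvStepA_false_lt (lo : Int) (lines : List String) (p : Int × String) (h : ¬ p.1 ≥ lo) :
    pvStepA lo (lines, false) p = (lines ++ [pvLine "CONTEXT" p], false) := by
  simp [pvStepA, h, pvLine]

-- once the flag is set, the loop only appends TARGET lines
lemma pvFold_true (lo : Int) : ∀ (turns : List (Int × String)) (lines : List String),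
    turns.foldl (pvStepA lo) (lines, true) = (lines ++ turns.map (pvLine "TARGET"), true) := by
  intro turns
  induction turns with
  | nil => intro lines; simp
  | cons p rest ih =>
      intro lines
      rw [List.foldl_cons, pvStepA_true, ih]
      simp

-- from an unset flag, the loop produces exactly B's split-and-render shape
lemma pvFold_false (lo : Int) : ∀ (turns : List (Int × String)) (lines : List String),
    turns.foldl (pvStepA lo) (lines, false) =
      (match (pvSplitAtTarget turns lo).2 with
       | none => (lines ++ (pvSplitAtTarget turns lo).1.map (pvLine "CONTEXT"), false)
       | some ts => (lines ++ (pvSplitAtTarget turns lo).1.map (pvLine "CONTEXT")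
                      ++ ["--- TARGET TURNS ---"] ++ ts.map (pvLine "TARGET"), true)) := by
  intro turns
  induction turns with
  | nil => intro lines; simp [pvSplitAtTarget]
  | cons p rest ih =>
      intro lines
      by_cases h : p.1 ≥ lo
      · rw [List.foldl_cons, pvStepA_false_ge lo lines p h, pvFold_true]
        simp [pvSplitAtTarget, h]
      · rw [List.foldl_cons, pvStepA_false_lt lo lines p h, ih]
        simp only [pvSplitAtTarget, if_neg h]
        cases hr : (pvSplitAtTarget rest lo).2 <;> simp [hr]

-- ===== VERDICT (by name: the statement is the Claim_ definition above) =====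
theorem render_window_block_py_spec : Claim_equal_render_window_block_py := by
  intro wt lo _
  unfold Spec_render_window_block_py render_window_block_py render_window_block_py_alt
  rw [pvFold_false]
  cases hr : (pvSplitAtTarget wt lo).2 <;> simp [hr]
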